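-- pv_equiv track=rewrite | github.com/chains-project/reproducible-central | minify-diffoscope.py | get_and_sanitize_leaf_nodes
-- ===== SOURCE A (Python) =====
-- def get_and_sanitize_leaf_nodes(all_lines):
--     leaf_nodes = all_lines[-1]
--
--     result = []
--     for source in leaf_nodes.split(','):
--         if 'zipinfo' in source or 'zipdetails' in source or 'zipnote' in source:
--             result.append(source.strip())
--         else:
--             # if it is any thing other than the above, we return empty list
--             return []
--     return result
-- ===== SOURCE B (Python) =====
-- def _collect(parts):
--     # Recursively validate-and-collect: None signals an invalid part anywhere in the tail.
--     if not parts: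
--         return []
--     head = parts[0]
--     if not any(k in head for k in ('zipinfo', 'zipdetails', 'zipnote')):
--         return None
--     tail = _collect(parts[1:])
--     if tail is None:
--         return None
--     return [head.strip()] + tail
--
-- def get_and_sanitize_leaf_nodes(all_lines):
--     out = _collect(all_lines[-1].split(','))
--     return [] if out is None else out
-- ===== Notes on version B (the rewrite author's own statement) =====
-- stated objective: alternative
-- what changed: Replaces A's iterative loop (mutable accumulator, early 'return []' from inside the loop) with a recursive helper over the split parts that returns an Option-like value: None propagates failure up the recursion, and the result list is built by consing stripped heads on the unwind instead of appending to an accumulator.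
import Mathlib
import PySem

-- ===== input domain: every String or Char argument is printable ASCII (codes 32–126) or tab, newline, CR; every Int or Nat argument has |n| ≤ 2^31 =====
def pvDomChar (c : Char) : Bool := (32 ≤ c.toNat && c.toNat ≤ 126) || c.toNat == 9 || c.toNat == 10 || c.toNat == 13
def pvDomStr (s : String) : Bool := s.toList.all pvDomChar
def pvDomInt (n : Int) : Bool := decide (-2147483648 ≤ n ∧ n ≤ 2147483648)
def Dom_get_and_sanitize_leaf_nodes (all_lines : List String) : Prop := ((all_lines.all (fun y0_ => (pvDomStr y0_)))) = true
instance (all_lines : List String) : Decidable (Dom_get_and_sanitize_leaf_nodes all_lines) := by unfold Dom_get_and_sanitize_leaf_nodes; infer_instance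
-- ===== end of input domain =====

-- B replaces A's accumulator loop with early return by a recursive Option-returning helper that conses stripped parts on the unwind; objective: alternative.

-- ===== PORT A =====
-- the 'zipinfo' / 'zipdetails' / 'zipnote' membership test, in A's branch order
def pvOkA (s : String) : Bool :=
  PySem.Str.isIn "zipinfo" s || PySem.Str.isIn "zipdetails" s || PySem.Str.isIn "zipnote" s

-- A's for-loop: accumulate stripped sources, early-return [] on the first bad one
def pvLoopA (acc : List String) : List String → List String
  | [] => acc
  | s :: rest => if pvOkA s then pvLoopA (acc ++ [PySem.Str.strip s]) rest else []

def get_and_sanitize_leaf_nodes (all_lines : List String) : List String :=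
  match PySem.List.pyGet? all_lines (-1) with
  | none => []  -- unreachable: Pre_ excludes the empty list (IndexError in Python)
  | some leaf_nodes => pvLoopA [] ((PySem.Str.split? leaf_nodes ",").getD [])

-- ===== PORT B =====
def pvOkB (s : String) : Bool :=
  ["zipinfo", "zipdetails", "zipnote"].any (fun k => PySem.Str.isIn k s)

-- Source B's _collect: none propagates failure; the list is built by consing on the unwind
def pvCollectB : List String → Option (List String)
  | [] => some []
  | head :: rest =>
    if pvOkB head then
      match pvCollectB rest with
      | none => none
      | some tail => some (PySem.Str.strip head :: tail)
    else none

def get_and_sanitize_leaf_nodes_alt (all_lines : List String) : List String :=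
  match PySem.List.pyGet? all_lines (-1) with
  | none => []  -- unreachable: Pre_ excludes the empty list (IndexError in Python)
  | some leaf =>
    match pvCollectB ((PySem.Str.split? leaf ",").getD []) with
    | none => []
    | some out => out

-- ===== PRECONDITION & SPEC =====
-- Python A raises IndexError on all_lines = [] (all_lines[-1]); excluded.
def Pre_get_and_sanitize_leaf_nodes (all_lines : List String) : Prop := all_lines ≠ []
instance (all_lines : List String) : Decidable (Pre_get_and_sanitize_leaf_nodes all_lines) := by unfold Pre_get_and_sanitize_leaf_nodes; infer_instance
def pvWitness_get_and_sanitize_leaf_nodes : List String := ["zipinfo a, zipnote b"]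

def Spec_get_and_sanitize_leaf_nodes (all_lines : List String) (out : List String) : Prop := out = get_and_sanitize_leaf_nodes_alt all_lines
instance (all_lines : List String) (out : List String) : Decidable (Spec_get_and_sanitize_leaf_nodes all_lines out) := by unfold Spec_get_and_sanitize_leaf_nodes; infer_instance

-- ===== CLAIM (what is proved, stated in full; the proofs are below) =====
def Claim_equal_get_and_sanitize_leaf_nodes : Prop := ∀ (all_lines : List String), Dom_get_and_sanitize_leaf_nodes all_lines → Pre_get_and_sanitize_leaf_nodes all_lines → Spec_get_and_sanitize_leaf_nodes all_lines (get_and_sanitize_leaf_nodes all_lines)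

-- ===== LEMMAS AND PROOFS =====
theorem pvOkA_eq_pvOkB (s : String) : pvOkA s = pvOkB s := by
  simp [pvOkA, pvOkB, Bool.or_assoc]

theorem pvLoopA_eq (parts acc : List String) :
    pvLoopA acc parts = match pvCollectB parts with
      | none => []
      | some out => acc ++ out := by
  induction parts generalizing acc with
  | nil => simp [pvLoopA, pvCollectB]
  | cons s rest ih =>
    simp only [pvLoopA, pvCollectB, pvOkA_eq_pvOkB]
    by_cases h : pvOkB s = true
    · simp only [h, if_true, ih]
      cases pvCollectB rest <;> simp
    · simp [h]

-- ===== VERDICT (by name: the statement is the Claim_ definition above) =====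
theorem get_and_sanitize_leaf_nodes_spec : Claim_equal_get_and_sanitize_leaf_nodes := by
  intro all_lines _ _
  unfold Spec_get_and_sanitize_leaf_nodes get_and_sanitize_leaf_nodes get_and_sanitize_leaf_nodes_alt
  cases PySem.List.pyGet? all_lines (-1) with
  | none => rfl
  | some leaf =>
    simp only [pvLoopA_eq]
    cases pvCollectB ((PySem.Str.split? leaf ",").getD []) <;> simp
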